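-- pv_equiv track=rewrite | github.com/sentientsergio/compliance-gpt | src/compilation/ceo_compiler_v2.py | _infer_domain
-- ===== SOURCE A (Python) =====
-- from typing import Dict, List, Optional, Tuple
--
-- def _infer_domain(election: Dict, sig: Dict) -> str:
--     """Infer domain from election context."""
--     text = " ".join([
--         election.get("section_context", ""),
--         election.get("question_text", "")
--     ]).lower()
--
--     # Priority order matching
--     if any(word in text for word in ["eligibility", "entry", "age"]):
--         return "eligibility"
--     if any(word in text for word in ["vesting", "years of service"]):
--         return "vesting"
--     if any(word in text for word in ["matching", "safe harbor", "qaca", "contribution"]):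
--         return "contributions"
--     if "loan" in text:
--         return "loans"
--     if any(word in text for word in ["hardship", "in-service", "in service", "rmd", "distribution"]):
--         return "distributions"
--
--     # Default fallback
--     return "eligibility"
-- ===== SOURCE B (Python) =====
-- # B: flat keyword -> (priority, label) index; pick the minimum-priority hit, no early-return branch chain.
-- _KEYWORD_DOMAIN = {
--     "eligibility": (0, "eligibility"),
--     "entry": (0, "eligibility"),
--     "age": (0, "eligibility"),
--     "vesting": (1, "vesting"),
--     "years of service": (1, "vesting"),
--     "matching": (2, "contributions"),
--     "safe harbor": (2, "contributions"),
--     "qaca": (2, "contributions"),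
--     "contribution": (2, "contributions"),
--     "loan": (3, "loans"),
--     "hardship": (4, "distributions"),
--     "in-service": (4, "distributions"),
--     "in service": (4, "distributions"),
--     "rmd": (4, "distributions"),
--     "distribution": (4, "distributions"),
-- }
--
-- def _infer_domain(election, sig):
--     """Infer domain from election context."""
--     text = " ".join([
--         election.get("section_context", ""),
--         election.get("question_text", "")
--     ]).lower()
--     hits = [pr for kw, pr in _KEYWORD_DOMAIN.items() if kw in text]
--     return min(hits, default=(0, "eligibility"))[1]
-- ===== Notes on version B (the rewrite author's own statement) =====
-- stated objective: alternative
-- what changed: Replaces the ordered if-guard chain and its early returns with a flat keyword-to-(priority,label) index: collect every keyword hit in the text and return the label of minimum priority (min over tuples), defaulting to eligibility.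
import Mathlib
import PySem

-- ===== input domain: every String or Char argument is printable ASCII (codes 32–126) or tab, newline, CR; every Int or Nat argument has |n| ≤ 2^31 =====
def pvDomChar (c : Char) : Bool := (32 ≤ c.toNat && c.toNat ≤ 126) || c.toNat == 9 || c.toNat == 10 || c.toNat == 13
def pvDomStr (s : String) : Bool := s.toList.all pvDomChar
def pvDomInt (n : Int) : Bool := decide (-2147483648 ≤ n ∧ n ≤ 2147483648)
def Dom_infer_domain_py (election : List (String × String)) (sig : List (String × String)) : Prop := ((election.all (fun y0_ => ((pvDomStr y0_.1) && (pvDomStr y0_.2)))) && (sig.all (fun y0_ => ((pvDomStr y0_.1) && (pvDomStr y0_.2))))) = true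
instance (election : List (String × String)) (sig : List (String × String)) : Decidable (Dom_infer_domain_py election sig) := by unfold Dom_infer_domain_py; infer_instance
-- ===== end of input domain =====

-- B replaces the ordered if-guard chain by a flat keyword->(priority,label) index: it collects all keyword hits and returns the minimum-priority label (alternative decomposition; same cost).


-- ===== PORT A =====
def infer_domain_py (election : List (String × String)) (_sig : List (String × String)) : String :=
  let text := PySem.Str.lower (PySem.Str.join " "
    [PySem.Dict.getD (PySem.Dict.mk election) "section_context" "", PySem.Dict.getD (PySem.Dict.mk election) "question_text" ""])
  if ["eligibility", "entry", "age"].any (fun w => PySem.Str.isIn w text) then "eligibility"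
  else if ["vesting", "years of service"].any (fun w => PySem.Str.isIn w text) then "vesting"
  else if ["matching", "safe harbor", "qaca", "contribution"].any (fun w => PySem.Str.isIn w text) then "contributions"
  else if PySem.Str.isIn "loan" text then "loans"
  else if ["hardship", "in-service", "in service", "rmd", "distribution"].any (fun w => PySem.Str.isIn w text) then "distributions"
  else "eligibility"

-- ===== PORT B =====
-- the flat keyword -> (priority, label) index (Source B's _KEYWORD_DOMAIN, in insertion order)
def pvKeywordDomain : List (String × Int × String) :=
  [("eligibility", 0, "eligibility"), ("entry", 0, "eligibility"), ("age", 0, "eligibility"),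
   ("vesting", 1, "vesting"), ("years of service", 1, "vesting"),
   ("matching", 2, "contributions"), ("safe harbor", 2, "contributions"),
   ("qaca", 2, "contributions"), ("contribution", 2, "contributions"),
   ("loan", 3, "loans"),
   ("hardship", 4, "distributions"), ("in-service", 4, "distributions"),
   ("in service", 4, "distributions"), ("rmd", 4, "distributions"),
   ("distribution", 4, "distributions")]

-- Python's '<' on str, hand-ported (exact on ASCII): lexicographic on code points
def pvStrLt : List Char → List Char → Bool
  | [], [] => false
  | [], _ :: _ => true
  | _ :: _, [] => false
  | a :: as, b :: bs => if a.toNat < b.toNat then true else if a.toNat == b.toNat then pvStrLt as bs else false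

-- Python's '<' on (int, str) tuples, used by min
def pvLexLt (a b : Int × String) : Bool := a.1 < b.1 || (a.1 == b.1 && pvStrLt a.2.toList b.2.toList)

-- min over a nonempty list: Python's min keeps the FIRST minimal element
def pvMinFold (acc : Int × String) : List (Int × String) → Int × String
  | [] => acc
  | x :: rest => pvMinFold (if pvLexLt x acc then x else acc) rest

def infer_domain_py_alt (election : List (String × String)) (_sig : List (String × String)) : String :=
  let text := PySem.Str.lower (PySem.Str.join " "
    [PySem.Dict.getD (PySem.Dict.mk election) "section_context" "", PySem.Dict.getD (PySem.Dict.mk election) "question_text" ""])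
  let hits := (pvKeywordDomain.filter (fun kv => PySem.Str.isIn kv.1 text)).map (fun kv => kv.2)
  (match hits with
   | [] => ((0 : Int), "eligibility")
   | h :: rest => pvMinFold h rest).2

-- ===== PRECONDITION & SPEC =====
def Spec_infer_domain_py (election : List (String × String)) (sig : List (String × String)) (out : String) : Prop := out = infer_domain_py_alt election sig
instance (election : List (String × String)) (sig : List (String × String)) (out : String) : Decidable (Spec_infer_domain_py election sig out) := by unfold Spec_infer_domain_py; infer_instance

-- ===== CLAIM (what is proved, stated in full; the proofs are below) =====
def Claim_equal_infer_domain_py : Prop := ∀ (election : List (String × String)) (sig : List (String × String)), Dom_infer_domain_py election sig → Spec_infer_domain_py election sig (infer_domain_py election sig)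

-- ===== LEMMAS AND PROOFS =====
-- the five priority groups of the index, and their common (priority, label) tuples
def pvG1 : List (String × Int × String) := [("eligibility", 0, "eligibility"), ("entry", 0, "eligibility"), ("age", 0, "eligibility")]
def pvG2 : List (String × Int × String) := [("vesting", 1, "vesting"), ("years of service", 1, "vesting")]
def pvG3 : List (String × Int × String) := [("matching", 2, "contributions"), ("safe harbor", 2, "contributions"), ("qaca", 2, "contributions"), ("contribution", 2, "contributions")]
def pvG4 : List (String × Int × String) := [("loan", 3, "loans")]
def pvG5 : List (String × Int × String) := [("hardship", 4, "distributions"), ("in-service", 4, "distributions"), ("in service", 4, "distributions"), ("rmd", 4, "distributions"), ("distribution", 4, "distributions")]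

-- folding min over elements none of which is strictly below acc keeps acc
theorem pvMinFold_keep (a : Int × String) (l : List (Int × String))
    (h : ∀ x ∈ l, pvLexLt x a = false) : pvMinFold a l = a := by
  induction l with
  | nil => rfl
  | cons x xs ih =>
    have hx := h x List.mem_cons_self
    simp only [pvMinFold, hx, Bool.false_eq_true, if_false]
    exact ih (fun y hy => h y (List.mem_cons_of_mem x hy))

-- hits coming from entries of `rest` none of which beats c do not beat c
theorem pvRestLt (p : String × Int × String → Bool) (rest : List (String × Int × String)) (c : Int × String)
    (hall : ∀ a ∈ rest, pvLexLt a.2 c = false) :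
    ∀ x ∈ (rest.filter p).map (fun kv => kv.2), pvLexLt x c = false := by
  intro x hx
  obtain ⟨b, hb, rfl⟩ := List.mem_map.1 hx
  exact hall b (List.mem_of_mem_filter hb)

-- a group none of whose keywords hits contributes no entries
theorem pvNilFilter (p : String × Int × String → Bool) (g : List (String × Int × String))
    (h : ∀ a ∈ g, p a = false) : g.filter p = [] :=
  List.filter_eq_nil_iff.2 (fun a ha => by simp [h a ha])

theorem pvSkip (p : String × Int × String → Bool) (g rest : List (String × Int × String))
    (h : ∀ a ∈ g, p a = false) : (g ++ rest).filter p = rest.filter p := by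
  rw [List.filter_append, pvNilFilter p g h, List.nil_append]

-- if some keyword of the leading group g (all of whose entries carry tuple c) hits, and no later hit beats c, the min is c
theorem pvStage (p : String × Int × String → Bool) (g rest : List (String × Int × String)) (c : Int × String)
    (hg : ∀ a ∈ g, a.2 = c)
    (hrest : ∀ x ∈ (rest.filter p).map (fun kv => kv.2), pvLexLt x c = false)
    (hcc : pvLexLt c c = false)
    (hne : ∃ a ∈ g, p a = true) :
    (match (((g ++ rest).filter p).map (fun kv => kv.2)) with
     | [] => ((0 : Int), "eligibility")
     | h :: rest' => pvMinFold h rest') = c := by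
  obtain ⟨a, ha, hpa⟩ := hne
  rw [List.filter_append]
  rcases hfe : g.filter p with _ | ⟨y, ys⟩
  · exact absurd (hfe ▸ List.mem_filter.2 ⟨ha, hpa⟩) (List.not_mem_nil)
  · have hymem : y ∈ g.filter p := by rw [hfe]; exact List.mem_cons_self
    have hy : y.2 = c := hg y (List.mem_of_mem_filter hymem)
    show pvMinFold y.2 ((ys ++ rest.filter p).map (fun kv => kv.2)) = c
    rw [hy]
    apply pvMinFold_keep
    intro x hx
    rw [List.map_append] at hx
    rcases List.mem_append.1 hx with hx | hx
    · obtain ⟨b, hb, rfl⟩ := List.mem_map.1 hx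
      have hbg : b ∈ g := List.mem_of_mem_filter (by rw [hfe]; exact List.mem_cons_of_mem y hb)
      rw [hg b hbg]; exact hcc
    · exact hrest x hx

-- turn the falsity of a guard into per-keyword falsity
theorem pvIsInFalse (t : String) (w : String) (ws : List String)
    (h : ¬ ((w :: ws).any (fun x => PySem.Str.isIn x t)) = true) :
    PySem.Str.isIn w t = false ∧ ¬ (ws.any (fun x => PySem.Str.isIn x t)) = true := by
  constructor
  · cases he : PySem.Str.isIn w t
    · rfl
    · exact absurd (by simp only [List.any_cons, he, Bool.true_or]) h
  · intro hws; exact h (by simp only [List.any_cons, hws, Bool.or_true])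

-- the heart of the equivalence, for an arbitrary lowered text t
theorem pvMain (t : String) :
    (if ["eligibility", "entry", "age"].any (fun w => PySem.Str.isIn w t) then "eligibility"
     else if ["vesting", "years of service"].any (fun w => PySem.Str.isIn w t) then "vesting"
     else if ["matching", "safe harbor", "qaca", "contribution"].any (fun w => PySem.Str.isIn w t) then "contributions"
     else if PySem.Str.isIn "loan" t then "loans"
     else if ["hardship", "in-service", "in service", "rmd", "distribution"].any (fun w => PySem.Str.isIn w t) then "distributions"
     else "eligibility") =
    ((match ((pvKeywordDomain.filter (fun kv : String × Int × String => PySem.Str.isIn kv.1 t)).map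
          (fun kv : String × Int × String => kv.2)) with
      | [] => ((0 : Int), "eligibility")
      | h :: rest => pvMinFold h rest).2 : String) := by
  have htab : pvKeywordDomain = pvG1 ++ (pvG2 ++ (pvG3 ++ (pvG4 ++ pvG5))) := rfl
  rw [htab]
  set p : String × Int × String → Bool := fun kv => PySem.Str.isIn kv.1 t with hp
  by_cases h1 : (["eligibility", "entry", "age"].any (fun w => PySem.Str.isIn w t)) = true
  · rw [if_pos h1, pvStage p pvG1 (pvG2 ++ (pvG3 ++ (pvG4 ++ pvG5))) ((0 : Int), "eligibility")
      (by intro a ha; fin_cases ha <;> rfl)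
      (pvRestLt p (pvG2 ++ (pvG3 ++ (pvG4 ++ pvG5))) ((0 : Int), "eligibility") (by intro a ha; fin_cases ha <;> rfl))
      rfl
      (by rcases List.any_eq_true.1 h1 with ⟨w, hw, hpw⟩
          fin_cases hw
          · exact ⟨("eligibility", 0, "eligibility"), by simp [pvG1], hpw⟩
          · exact ⟨("entry", 0, "eligibility"), by simp [pvG1], hpw⟩
          · exact ⟨("age", 0, "eligibility"), by simp [pvG1], hpw⟩)]
  · obtain ⟨e1, h1r⟩ := pvIsInFalse t _ _ h1
    obtain ⟨e2, h1r⟩ := pvIsInFalse t _ _ h1r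
    obtain ⟨e3, _⟩ := pvIsInFalse t _ _ h1r
    have h1' : ∀ a ∈ pvG1, p a = false := by
      intro a ha; fin_cases ha
      · exact e1
      · exact e2
      · exact e3
    rw [if_neg h1, pvSkip p pvG1 _ h1']
    by_cases h2 : (["vesting", "years of service"].any (fun w => PySem.Str.isIn w t)) = true
    · rw [if_pos h2, pvStage p pvG2 (pvG3 ++ (pvG4 ++ pvG5)) ((1 : Int), "vesting")
        (by intro a ha; fin_cases ha <;> rfl)
        (pvRestLt p (pvG3 ++ (pvG4 ++ pvG5)) ((1 : Int), "vesting") (by intro a ha; fin_cases ha <;> rfl))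
        rfl
        (by rcases List.any_eq_true.1 h2 with ⟨w, hw, hpw⟩
            fin_cases hw
            · exact ⟨("vesting", 1, "vesting"), by simp [pvG2], hpw⟩
            · exact ⟨("years of service", 1, "vesting"), by simp [pvG2], hpw⟩)]
    · obtain ⟨f1, h2r⟩ := pvIsInFalse t _ _ h2
      obtain ⟨f2, _⟩ := pvIsInFalse t _ _ h2r
      have h2' : ∀ a ∈ pvG2, p a = false := by
        intro a ha; fin_cases ha
        · exact f1
        · exact f2
      rw [if_neg h2, pvSkip p pvG2 _ h2']
      by_cases h3 : (["matching", "safe harbor", "qaca", "contribution"].any (fun w => PySem.Str.isIn w t)) = true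
      · rw [if_pos h3, pvStage p pvG3 (pvG4 ++ pvG5) ((2 : Int), "contributions")
          (by intro a ha; fin_cases ha <;> rfl)
          (pvRestLt p (pvG4 ++ pvG5) ((2 : Int), "contributions") (by intro a ha; fin_cases ha <;> rfl))
          rfl
          (by rcases List.any_eq_true.1 h3 with ⟨w, hw, hpw⟩
              fin_cases hw
              · exact ⟨("matching", 2, "contributions"), by simp [pvG3], hpw⟩
              · exact ⟨("safe harbor", 2, "contributions"), by simp [pvG3], hpw⟩
              · exact ⟨("qaca", 2, "contributions"), by simp [pvG3], hpw⟩
              · exact ⟨("contribution", 2, "contributions"), by simp [pvG3], hpw⟩)]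
      · obtain ⟨g1, h3r⟩ := pvIsInFalse t _ _ h3
        obtain ⟨g2, h3r⟩ := pvIsInFalse t _ _ h3r
        obtain ⟨g3, h3r⟩ := pvIsInFalse t _ _ h3r
        obtain ⟨g4, _⟩ := pvIsInFalse t _ _ h3r
        have h3' : ∀ a ∈ pvG3, p a = false := by
          intro a ha; fin_cases ha
          · exact g1
          · exact g2
          · exact g3
          · exact g4
        rw [if_neg h3, pvSkip p pvG3 _ h3']
        by_cases h4 : PySem.Str.isIn "loan" t = true
        · rw [if_pos h4, pvStage p pvG4 pvG5 ((3 : Int), "loans")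
            (by intro a ha; fin_cases ha; rfl)
            (pvRestLt p pvG5 ((3 : Int), "loans") (by intro a ha; fin_cases ha <;> rfl))
            rfl
            ⟨("loan", 3, "loans"), by simp [pvG4], h4⟩]
        · have e4 : PySem.Str.isIn "loan" t = false := by
            cases he : PySem.Str.isIn "loan" t
            · rfl
            · exact absurd he h4
          have h4' : ∀ a ∈ pvG4, p a = false := by
            intro a ha; fin_cases ha
            · exact e4
          rw [if_neg h4, pvSkip p pvG4 _ h4']
          by_cases h5 : (["hardship", "in-service", "in service", "rmd", "distribution"].any (fun w => PySem.Str.isIn w t)) = true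
          · rw [if_pos h5]
            have hst := pvStage p pvG5 [] ((4 : Int), "distributions")
              (by intro a ha; fin_cases ha <;> rfl)
              (by intro x hx; simp at hx)
              rfl
              (by rcases List.any_eq_true.1 h5 with ⟨w, hw, hpw⟩
                  fin_cases hw
                  · exact ⟨("hardship", 4, "distributions"), by simp [pvG5], hpw⟩
                  · exact ⟨("in-service", 4, "distributions"), by simp [pvG5], hpw⟩
                  · exact ⟨("in service", 4, "distributions"), by simp [pvG5], hpw⟩
                  · exact ⟨("rmd", 4, "distributions"), by simp [pvG5], hpw⟩
                  · exact ⟨("distribution", 4, "distributions"), by simp [pvG5], hpw⟩)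
            rw [List.append_nil] at hst
            rw [hst]
          · obtain ⟨k1, h5r⟩ := pvIsInFalse t _ _ h5
            obtain ⟨k2, h5r⟩ := pvIsInFalse t _ _ h5r
            obtain ⟨k3, h5r⟩ := pvIsInFalse t _ _ h5r
            obtain ⟨k4, h5r⟩ := pvIsInFalse t _ _ h5r
            obtain ⟨k5, _⟩ := pvIsInFalse t _ _ h5r
            have h5' : ∀ a ∈ pvG5, p a = false := by
              intro a ha; fin_cases ha
              · exact k1
              · exact k2
              · exact k3
              · exact k4
              · exact k5
            rw [if_neg h5, pvNilFilter p pvG5 h5']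
            rfl

-- ===== VERDICT (by name: the statement is the Claim_ definition above) =====
set_option maxHeartbeats 1000000 in
theorem infer_domain_py_spec : Claim_equal_infer_domain_py := by
  intro election sig _
  unfold Spec_infer_domain_py infer_domain_py infer_domain_py_alt
  exact pvMain _
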